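-- pv_equiv track=rewrite | github.com/thecodeartificerX/golem-cli | src/golem/recovery.py | _error_hash
-- ===== SOURCE A (Python) =====
-- def _error_hash(text: str) -> str:
--     """djb2-style non-cryptographic hash, returns base-36 string.
--
--     Normalises to lowercase + stripped before hashing so minor whitespace
--     differences in the same error message produce the same hash.
--     """
--     normalized = text.lower().strip()
--     h = 0
--     for ch in normalized:
--         h = ((h << 5) - h + ord(ch)) & 0xFFFFFFFF
--     # Produce a signed 32-bit integer (mirrors JS `| 0` behaviour)
--     if h >= 0x80000000:
--         h -= 0x100000000
--     return str(h) if h != 0 else "0"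
-- ===== SOURCE B (Python) =====
-- def _poly31(s: str, m: int) -> int:
--     """Hash of s as the polynomial sum(ord(c)*31**k) mod m, computed by
--     divide and conquer: hash(L+R) = hash(L)*31**len(R) + hash(R) (mod m)."""
--     n = len(s)
--     if n == 0:
--         return 0
--     if n == 1:
--         return ord(s)
--     mid = n // 2
--     return (_poly31(s[:mid], m) * pow(31, n - mid, m) + _poly31(s[mid:], m)) % m
--
-- def _error_hash(text: str) -> str:
--     normalized = text.lower().strip()
--     h = _poly31(normalized, 0x100000000)
--     if h >= 0x80000000:
--         h -= 0x100000000
--     return str(h) if h != 0 else "0"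
-- ===== Notes on version B (the rewrite author's own statement) =====
-- stated objective: alternative
-- what changed: Replaces A's per-character masked Horner fold ((h<<5)-h+ord(c) & mask each step) with a recursive divide-and-conquer polynomial evaluation: split the normalized string in half and combine via hash(L+R) = (hash(L)*pow(31, len(R), 2**32) + hash(R)) % 2**32, then apply the same signed-32-bit conversion.
import Mathlib
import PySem

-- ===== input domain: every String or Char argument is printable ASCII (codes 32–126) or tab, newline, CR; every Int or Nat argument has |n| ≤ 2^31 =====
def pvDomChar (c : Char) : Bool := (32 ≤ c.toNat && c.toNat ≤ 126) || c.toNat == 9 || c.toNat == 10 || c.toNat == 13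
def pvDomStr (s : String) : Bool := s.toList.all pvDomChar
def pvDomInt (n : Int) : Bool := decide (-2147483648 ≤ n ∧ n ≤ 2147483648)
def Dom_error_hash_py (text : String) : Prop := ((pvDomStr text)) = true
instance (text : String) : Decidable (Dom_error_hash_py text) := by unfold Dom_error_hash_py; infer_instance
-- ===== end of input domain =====

-- B replaces A's per-character masked Horner fold by a divide-and-conquer modular
-- polynomial evaluation (hash(L++R) = hash(L)*31^|R| + hash(R) mod 2^32) using
-- pow(31, k, 2^32); objective: alternative.

-- ===== PORT A =====
def error_hash_py (text : String) : String :=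
  let normalized := PySem.Str.strip (PySem.Str.lower text)
  let h : Int := normalized.toList.foldl
    (fun h ch => PySem.Int.band ((h <<< (5 : Nat)) - h + (ch.toNat : Int)) 0xFFFFFFFF) 0
  let h := if h ≥ 0x80000000 then h - 0x100000000 else h
  if h ≠ 0 then PySem.Int.toStr h else "0"

-- ===== PORT B =====
-- _poly31: hash of s as the polynomial sum(ord(c)*31^k) mod m, by divide and conquer
def pvPoly31 : List Char → Int → Int
  | [], _ => 0
  | [c], _ => (c.toNat : Int)
  | c1 :: c2 :: rest, m =>
      let s := c1 :: c2 :: rest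
      let n := s.length
      let mid := n / 2
      PySem.Int.mod
        (pvPoly31 (s.take mid) m * PySem.Int.powMod 31 (n - mid) m + pvPoly31 (s.drop mid) m) m
termination_by s _ => s.length
decreasing_by
  · simp [List.length_take]; omega
  · simp [List.length_drop]; omega

def error_hash_py_alt (text : String) : String :=
  let normalized := PySem.Str.strip (PySem.Str.lower text)
  let h := pvPoly31 normalized.toList 0x100000000
  let h := if h ≥ 0x80000000 then h - 0x100000000 else h
  if h ≠ 0 then PySem.Int.toStr h else "0"

-- ===== PRECONDITION & SPEC =====
def Spec_error_hash_py (text : String) (out : String) : Prop := out = error_hash_py_alt text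
instance (text : String) (out : String) : Decidable (Spec_error_hash_py text out) := by unfold Spec_error_hash_py; infer_instance

-- ===== CLAIM =====
def Claim_equal_error_hash_py : Prop := ∀ (text : String), Dom_error_hash_py text → Spec_error_hash_py text (error_hash_py text)

-- ===== LEMMAS AND PROOFS =====

-- band with the 32-bit mask is reduction mod 2^32 on nonnegative integers
theorem pv_band_mask (a : Int) (ha : 0 ≤ a) :
    PySem.Int.band a 0xFFFFFFFF = a % 4294967296 := by
  rw [PySem.Int.band_of_nonneg ha (by norm_num)]
  have h3 : (4294967295 : Int).toNat = 4294967295 := rfl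
  have h2 := Nat.and_two_pow_sub_one_eq_mod a.toNat 32
  norm_num at h2
  rw [h3, h2]
  omega

-- A's masked fold equals the unmasked Horner fold reduced mod 2^32
theorem pv_mask_fold (l : List Char) (a : Int) (ha : 0 ≤ a) :
    l.foldl (fun h ch => PySem.Int.band ((h <<< (5 : Nat)) - h + (ch.toNat : Int)) 0xFFFFFFFF) (a % 4294967296)
      = (l.foldl (fun h ch => 31 * h + (ch.toNat : Int)) a) % 4294967296 := by
  induction l generalizing a with
  | nil => simp
  | cons c l ih =>
      simp only [List.foldl_cons]
      have hm : 0 ≤ a % 4294967296 := Int.emod_nonneg a (by norm_num)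
      have hstep : ((a % 4294967296) <<< (5 : Nat)) - (a % 4294967296) + (c.toNat : Int)
          = 31 * (a % 4294967296) + (c.toNat : Int) := by
        rw [Int.shiftLeft_eq]; ring
      rw [hstep, pv_band_mask _ (by positivity)]
      have heq : (31 * (a % 4294967296) + (c.toNat : Int)) % 4294967296
          = (31 * a + (c.toNat : Int)) % 4294967296 := by omega
      rw [heq, ih _ (by positivity)]

-- the Horner fold with accumulator a splits off a * 31^length
theorem pv_horner_shift (l : List Char) (a : Int) :
    l.foldl (fun h ch => 31 * h + (ch.toNat : Int)) a
      = a * 31 ^ l.length + l.foldl (fun h ch => 31 * h + (ch.toNat : Int)) 0 := by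
  induction l generalizing a with
  | nil => simp
  | cons c l ih =>
      simp only [List.foldl_cons, List.length_cons]
      rw [ih (31 * a + (c.toNat : Int)), ih ((31 : Int) * 0 + (c.toNat : Int))]
      ring

-- the Horner hash of a concatenation
theorem pv_horner_append (l1 l2 : List Char) :
    (l1 ++ l2).foldl (fun h ch => 31 * h + (ch.toNat : Int)) 0
      = (l1.foldl (fun h ch => 31 * h + (ch.toNat : Int)) 0) * 31 ^ l2.length
        + l2.foldl (fun h ch => 31 * h + (ch.toNat : Int)) 0 := by
  rw [List.foldl_append, pv_horner_shift]

-- B's divide-and-conquer evaluation equals the Horner hash reduced mod 2^32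
theorem pv_poly_eq_aux (n : Nat) : ∀ (l : List Char), l.length ≤ n →
    pvPoly31 l 4294967296
      = (l.foldl (fun h ch => 31 * h + (ch.toNat : Int)) 0) % 4294967296 := by
  induction n with
  | zero =>
      intro l hl
      rw [List.length_eq_zero_iff.mp (Nat.le_zero.mp hl)]
      simp [pvPoly31]
  | succ n ih =>
      intro l hl
      rcases l with _ | ⟨c1, _ | ⟨c2, rest⟩⟩
      · simp [pvPoly31]
      · have hc : c1.toNat < 4294967296 := c1.val.toNat_lt_size
        simp only [pvPoly31, List.foldl_cons, List.foldl_nil]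
        omega
      · have hlen : (c1 :: c2 :: rest).length = rest.length + 2 := by simp
        have ih1 := ih ((c1 :: c2 :: rest).take ((c1 :: c2 :: rest).length / 2))
          (by simp [List.length_take]; omega)
        have ih2 := ih ((c1 :: c2 :: rest).drop ((c1 :: c2 :: rest).length / 2))
          (by simp [List.length_drop]; simp at hl; omega)
        simp only [pvPoly31]
        rw [PySem.Int.mod_eq_emod_of_pos (by norm_num), PySem.Int.powMod_eq,
          PySem.Int.mod_eq_emod_of_pos (by norm_num), ih1, ih2]
        have hsplit : (c1 :: c2 :: rest) =
            (c1 :: c2 :: rest).take ((c1 :: c2 :: rest).length / 2)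
              ++ (c1 :: c2 :: rest).drop ((c1 :: c2 :: rest).length / 2) := by
          rw [List.take_append_drop]
        conv_rhs => rw [hsplit]
        rw [pv_horner_append]
        have hdl : ((c1 :: c2 :: rest).drop ((c1 :: c2 :: rest).length / 2)).length
            = (c1 :: c2 :: rest).length - (c1 :: c2 :: rest).length / 2 := by
          rw [List.length_drop]
        rw [← hdl]
        generalize (c1 :: c2 :: rest).take ((c1 :: c2 :: rest).length / 2) = L at *
        generalize (c1 :: c2 :: rest).drop ((c1 :: c2 :: rest).length / 2) = R at *
        generalize L.foldl (fun h ch => 31 * h + (ch.toNat : Int)) 0 = a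
        generalize R.foldl (fun h ch => 31 * h + (ch.toNat : Int)) 0 = b
        generalize (31 : Int) ^ R.length = p
        calc (a % 4294967296 * (p % 4294967296) + b % 4294967296) % 4294967296
            = ((a % 4294967296 * (p % 4294967296)) % 4294967296 + (b % 4294967296) % 4294967296) % 4294967296 := by
              rw [← Int.add_emod]
          _ = ((a * p) % 4294967296 + b % 4294967296) % 4294967296 := by
              rw [← Int.mul_emod, Int.emod_emod_of_dvd _ dvd_rfl]
          _ = (a * p + b) % 4294967296 := by rw [← Int.add_emod]

theorem pv_poly_eq (l : List Char) :
    pvPoly31 l 4294967296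
      = (l.foldl (fun h ch => 31 * h + (ch.toNat : Int)) 0) % 4294967296 :=
  pv_poly_eq_aux l.length l le_rfl

-- the two hash accumulators agree on every list of characters
theorem pv_hash_eq (l : List Char) :
    l.foldl (fun h ch => PySem.Int.band ((h <<< (5 : Nat)) - h + (ch.toNat : Int)) 0xFFFFFFFF) 0
      = pvPoly31 l 0x100000000 := by
  have h1 := pv_mask_fold l 0 le_rfl
  norm_num at h1
  rw [h1, pv_poly_eq]

-- ===== VERDICT =====
theorem error_hash_py_spec : Claim_equal_error_hash_py := by
  intro text _
  unfold Spec_error_hash_py error_hash_py error_hash_py_alt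
  simp only
  rw [pv_hash_eq]
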